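-- pv_equiv track=rewrite | github.com/paulvinueza30/X_Scraper | x_scraper/config.py | _normalize_account
-- ===== SOURCE A (Python) =====
-- def _normalize_account(account: str) -> str:
--     """
--     Normalize account input to just the handle.
--
--     Accepts:
--     - username
--     - @username
--     - https://x.com/username
--     - https://twitter.com/username
--     """
--     account = account.strip()
--
--     # Remove URL prefix
--     for prefix in ["https://x.com/", "https://twitter.com/",
--                    "http://x.com/", "http://twitter.com/",
--                    "x.com/", "twitter.com/"]:
--         if account.lower().startswith(prefix.lower()):
--             account = account[len(prefix):]
--             break
--
--     # Remove @ prefix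
--     if account.startswith("@"):
--         account = account[1:]
--
--     # Remove any trailing path (e.g., /status/123)
--     if "/" in account:
--         account = account.split("/")[0]
--
--     return account
-- ===== SOURCE B (Python) =====
-- def _normalize_account(account: str) -> str:
--     account = account.strip()
--     # Factor the URL prefix into scheme + host instead of scanning six full prefixes.
--     low = account.lower()
--     scheme = 8 if low.startswith("https://") else 7 if low.startswith("http://") else 0
--     rest = low[scheme:]
--     if rest.startswith("x.com/"):
--         account = account[scheme + 6:]
--     elif rest.startswith("twitter.com/"):
--         account = account[scheme + 12:]
--     if account.startswith("@"):
--         account = account[1:]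
--     if "/" in account:
--         account = account.split("/")[0]
--     return account
-- ===== Notes on version B (the rewrite author's own statement) =====
-- stated objective: alternative
-- what changed: The scan over six full URL prefixes is replaced by factoring the prefix into a scheme-length computation (https:///http:///none) followed by two host checks at that offset, slicing by the computed length.
import Mathlib
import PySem

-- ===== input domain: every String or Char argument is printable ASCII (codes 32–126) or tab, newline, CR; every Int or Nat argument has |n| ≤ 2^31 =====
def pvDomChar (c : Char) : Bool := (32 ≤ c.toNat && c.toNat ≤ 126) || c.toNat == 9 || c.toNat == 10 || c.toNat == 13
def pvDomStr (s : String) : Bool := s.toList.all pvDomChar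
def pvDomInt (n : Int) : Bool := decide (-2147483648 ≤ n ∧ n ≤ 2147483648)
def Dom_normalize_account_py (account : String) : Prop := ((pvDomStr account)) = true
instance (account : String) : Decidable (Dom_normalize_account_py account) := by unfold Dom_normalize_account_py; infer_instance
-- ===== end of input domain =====

-- B factors the six-prefix scan into a scheme-length computation plus two host checks (alternative decomposition, same behaviour).


-- ===== PORT A =====
def normalize_account_py (account : String) : String :=
  let a := PySem.Str.strip account
  let a :=
    if PySem.Str.startswith (PySem.Str.lower a) "https://x.com/" then PySem.Str.slice a (some 14) none
    else if PySem.Str.startswith (PySem.Str.lower a) "https://twitter.com/" then PySem.Str.slice a (some 20) none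
    else if PySem.Str.startswith (PySem.Str.lower a) "http://x.com/" then PySem.Str.slice a (some 13) none
    else if PySem.Str.startswith (PySem.Str.lower a) "http://twitter.com/" then PySem.Str.slice a (some 19) none
    else if PySem.Str.startswith (PySem.Str.lower a) "x.com/" then PySem.Str.slice a (some 6) none
    else if PySem.Str.startswith (PySem.Str.lower a) "twitter.com/" then PySem.Str.slice a (some 12) none
    else a
  let a := if PySem.Str.startswith a "@" then PySem.Str.slice a (some 1) none else a
  if PySem.Str.isIn "/" a then ((PySem.Str.split? a "/").getD []).headD "" else a

-- ===== PORT B =====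
def normalize_account_py_alt (account : String) : String :=
  let a := PySem.Str.strip account
  let low := PySem.Str.lower a
  let scheme : Int :=
    if PySem.Str.startswith low "https://" then 8
    else if PySem.Str.startswith low "http://" then 7
    else 0
  let rest := PySem.Str.slice low (some scheme) none
  let a :=
    if PySem.Str.startswith rest "x.com/" then PySem.Str.slice a (some (scheme + 6)) none
    else if PySem.Str.startswith rest "twitter.com/" then PySem.Str.slice a (some (scheme + 12)) none
    else a
  let a := if PySem.Str.startswith a "@" then PySem.Str.slice a (some 1) none else a
  if PySem.Str.isIn "/" a then ((PySem.Str.split? a "/").getD []).headD "" else a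

-- ===== PRECONDITION & SPEC =====
def Spec_normalize_account_py (account : String) (out : String) : Prop := out = normalize_account_py_alt account
instance (account : String) (out : String) : Decidable (Spec_normalize_account_py account out) := by unfold Spec_normalize_account_py; infer_instance

-- ===== CLAIM (what is proved, stated in full; the proofs are below) =====
def Claim_equal_normalize_account_py : Prop := ∀ (account : String), Dom_normalize_account_py account → Spec_normalize_account_py account (normalize_account_py account)

-- ===== LEMMAS AND PROOFS =====

-- (p ++ q) is a prefix of l iff p is and q continues at position p.length
theorem pv_prefix_append_iff (p q l : List Char) :
    (p ++ q) <+: l ↔ p <+: l ∧ q <+: l.drop p.length := by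
  constructor
  · rintro ⟨t, rfl⟩
    refine ⟨⟨q ++ t, by simp⟩, ?_⟩
    rw [List.append_assoc, List.drop_left]
    exact ⟨t, rfl⟩
  · rintro ⟨⟨r, rfl⟩, hq⟩
    rw [List.drop_left] at hq
    obtain ⟨t, rfl⟩ := hq
    exact ⟨t, by simp⟩

-- a startswith test on a prefix that splits as scheme ++ host
theorem pv_sw_split (t P S H : String) (k : Nat)
    (hPSH : P.toList = S.toList ++ H.toList) (hk : S.toList.length = k) :
    PySem.Str.startswith t P = true ↔ (S.toList <+: t.toList ∧ H.toList <+: t.toList.drop k) := by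
  rw [PySem.Str.startswith_eq, PySem.Chars.startswith_iff, hPSH, pv_prefix_append_iff, hk]

theorem pv_btrue {c : Bool} {p : Prop} (h : c = true ↔ p) (hp : p) : c = true := h.mpr hp

theorem pv_nneg {c : Bool} (e : c = false) : ¬ (c = true) := by simp [e]

theorem pv_bfalse {c : Bool} {p : Prop} (h : c = true ↔ p) (hn : ¬ p) : c = false := by
  cases hc : c
  · rfl
  · exact absurd (h.mp hc) hn


-- the prefix-removal stages agree on every string
theorem pv_stage_eq (s : String) :
    (if PySem.Str.startswith (PySem.Str.lower s) "https://x.com/" then PySem.Str.slice s (some 14) none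
     else if PySem.Str.startswith (PySem.Str.lower s) "https://twitter.com/" then PySem.Str.slice s (some 20) none
     else if PySem.Str.startswith (PySem.Str.lower s) "http://x.com/" then PySem.Str.slice s (some 13) none
     else if PySem.Str.startswith (PySem.Str.lower s) "http://twitter.com/" then PySem.Str.slice s (some 19) none
     else if PySem.Str.startswith (PySem.Str.lower s) "x.com/" then PySem.Str.slice s (some 6) none
     else if PySem.Str.startswith (PySem.Str.lower s) "twitter.com/" then PySem.Str.slice s (some 12) none
     else s) =
    (let low := PySem.Str.lower s
     let scheme : Int :=
       if PySem.Str.startswith low "https://" then 8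
       else if PySem.Str.startswith low "http://" then 7
       else 0
     let rest := PySem.Str.slice low (some scheme) none
     if PySem.Str.startswith rest "x.com/" then PySem.Str.slice s (some (scheme + 6)) none
     else if PySem.Str.startswith rest "twitter.com/" then PySem.Str.slice s (some (scheme + 12)) none
     else s) := by
  dsimp only
  have hsw : ∀ (P : String), PySem.Str.startswith (PySem.Str.lower s) P = true ↔ P.toList <+: (PySem.Str.lower s).toList := by
    intro P; rw [PySem.Str.startswith_eq, PySem.Chars.startswith_iff]
  have hdrop : ∀ (k : Int), 0 ≤ k → (PySem.Str.slice (PySem.Str.lower s) (some k) none).toList = (PySem.Str.lower s).toList.drop k.toNat := by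
    intro k hk
    simp [PySem.Str.toList_slice]
    rw [PySem.List.slice_from _ hk]
  have g8 : ∀ (P : String), PySem.Str.startswith (PySem.Str.slice (PySem.Str.lower s) (some (8:Int)) none) P = true ↔ P.toList <+: (PySem.Str.lower s).toList.drop 8 := by
    intro P
    rw [PySem.Str.startswith_eq, PySem.Chars.startswith_iff, hdrop 8 (by norm_num)]
    simp
  have g7 : ∀ (P : String), PySem.Str.startswith (PySem.Str.slice (PySem.Str.lower s) (some (7:Int)) none) P = true ↔ P.toList <+: (PySem.Str.lower s).toList.drop 7 := by
    intro P
    rw [PySem.Str.startswith_eq, PySem.Chars.startswith_iff, hdrop 7 (by norm_num)]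
    simp
  have g0 : ∀ (P : String), PySem.Str.startswith (PySem.Str.slice (PySem.Str.lower s) (some (0:Int)) none) P = true ↔ P.toList <+: (PySem.Str.lower s).toList := by
    intro P
    rw [PySem.Str.startswith_eq, PySem.Chars.startswith_iff, hdrop 0 (by norm_num)]
    simp
  have d1 := pv_sw_split (PySem.Str.lower s) "https://x.com/" "https://" "x.com/" 8 (by decide) (by decide)
  have d2 := pv_sw_split (PySem.Str.lower s) "https://twitter.com/" "https://" "twitter.com/" 8 (by decide) (by decide)
  have d3 := pv_sw_split (PySem.Str.lower s) "http://x.com/" "http://" "x.com/" 7 (by decide) (by decide)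
  have d4 := pv_sw_split (PySem.Str.lower s) "http://twitter.com/" "http://" "twitter.com/" 7 (by decide) (by decide)
  by_cases hS : ("https://" : String).toList <+: (PySem.Str.lower s).toList
  · have hH : ¬ ("http://" : String).toList <+: (PySem.Str.lower s).toList := fun h =>
      absurd (List.prefix_of_prefix_length_le h hS (by decide)) (by decide)
    have hx6 : ¬ ("x.com/" : String).toList <+: (PySem.Str.lower s).toList := fun h =>
      absurd (List.prefix_of_prefix_length_le h hS (by decide)) (by decide)
    have ht12 : ¬ ("twitter.com/" : String).toList <+: (PySem.Str.lower s).toList := fun h =>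
      absurd (List.prefix_of_prefix_length_le hS h (by decide)) (by decide)
    have f1 := pv_btrue (hsw "https://") hS
    by_cases hx : ("x.com/" : String).toList <+: (PySem.Str.lower s).toList.drop 8
    · rw [if_pos (pv_btrue d1 ⟨hS, hx⟩), if_pos f1, if_pos (pv_btrue (g8 "x.com/") hx)]
      norm_num
    · by_cases ht : ("twitter.com/" : String).toList <+: (PySem.Str.lower s).toList.drop 8
      · rw [if_neg (pv_nneg (pv_bfalse d1 (fun h => hx h.2))), if_pos (pv_btrue d2 ⟨hS, ht⟩),
          if_pos f1, if_neg (pv_nneg (pv_bfalse (g8 "x.com/") hx)),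
          if_pos (pv_btrue (g8 "twitter.com/") ht)]
        norm_num
      · rw [if_neg (pv_nneg (pv_bfalse d1 (fun h => hx h.2))),
          if_neg (pv_nneg (pv_bfalse d2 (fun h => ht h.2))),
          if_neg (pv_nneg (pv_bfalse d3 (fun h => hH h.1))),
          if_neg (pv_nneg (pv_bfalse d4 (fun h => hH h.1))),
          if_neg (pv_nneg (pv_bfalse (hsw "x.com/") hx6)),
          if_neg (pv_nneg (pv_bfalse (hsw "twitter.com/") ht12)),
          if_pos f1, if_neg (pv_nneg (pv_bfalse (g8 "x.com/") hx)),
          if_neg (pv_nneg (pv_bfalse (g8 "twitter.com/") ht))]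
  · by_cases hH : ("http://" : String).toList <+: (PySem.Str.lower s).toList
    · have hx6 : ¬ ("x.com/" : String).toList <+: (PySem.Str.lower s).toList := fun h =>
        absurd (List.prefix_of_prefix_length_le h hH (by decide)) (by decide)
      have ht12 : ¬ ("twitter.com/" : String).toList <+: (PySem.Str.lower s).toList := fun h =>
        absurd (List.prefix_of_prefix_length_le hH h (by decide)) (by decide)
      have f1 := pv_bfalse (hsw "https://") hS
      have f2 := pv_btrue (hsw "http://") hH
      by_cases hx : ("x.com/" : String).toList <+: (PySem.Str.lower s).toList.drop 7
      · rw [if_neg (pv_nneg (pv_bfalse d1 (fun h => hS h.1))),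
          if_neg (pv_nneg (pv_bfalse d2 (fun h => hS h.1))),
          if_pos (pv_btrue d3 ⟨hH, hx⟩), if_neg (pv_nneg f1), if_pos f2,
          if_pos (pv_btrue (g7 "x.com/") hx)]
        norm_num
      · by_cases ht : ("twitter.com/" : String).toList <+: (PySem.Str.lower s).toList.drop 7
        · rw [if_neg (pv_nneg (pv_bfalse d1 (fun h => hS h.1))),
            if_neg (pv_nneg (pv_bfalse d2 (fun h => hS h.1))),
            if_neg (pv_nneg (pv_bfalse d3 (fun h => hx h.2))),
            if_pos (pv_btrue d4 ⟨hH, ht⟩), if_neg (pv_nneg f1), if_pos f2,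
            if_neg (pv_nneg (pv_bfalse (g7 "x.com/") hx)),
            if_pos (pv_btrue (g7 "twitter.com/") ht)]
          norm_num
        · rw [if_neg (pv_nneg (pv_bfalse d1 (fun h => hS h.1))),
            if_neg (pv_nneg (pv_bfalse d2 (fun h => hS h.1))),
            if_neg (pv_nneg (pv_bfalse d3 (fun h => hx h.2))),
            if_neg (pv_nneg (pv_bfalse d4 (fun h => ht h.2))),
            if_neg (pv_nneg (pv_bfalse (hsw "x.com/") hx6)),
            if_neg (pv_nneg (pv_bfalse (hsw "twitter.com/") ht12)),
            if_neg (pv_nneg f1), if_pos f2,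
            if_neg (pv_nneg (pv_bfalse (g7 "x.com/") hx)),
            if_neg (pv_nneg (pv_bfalse (g7 "twitter.com/") ht))]
    · have f1 := pv_bfalse (hsw "https://") hS
      have f2 := pv_bfalse (hsw "http://") hH
      by_cases hx : ("x.com/" : String).toList <+: (PySem.Str.lower s).toList
      · rw [if_neg (pv_nneg (pv_bfalse d1 (fun h => hS h.1))),
          if_neg (pv_nneg (pv_bfalse d2 (fun h => hS h.1))),
          if_neg (pv_nneg (pv_bfalse d3 (fun h => hH h.1))),
          if_neg (pv_nneg (pv_bfalse d4 (fun h => hH h.1))),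
          if_pos (pv_btrue (hsw "x.com/") hx),
          if_neg (pv_nneg f1), if_neg (pv_nneg f2),
          if_pos (pv_btrue (g0 "x.com/") hx)]
        norm_num
      · by_cases ht : ("twitter.com/" : String).toList <+: (PySem.Str.lower s).toList
        · rw [if_neg (pv_nneg (pv_bfalse d1 (fun h => hS h.1))),
            if_neg (pv_nneg (pv_bfalse d2 (fun h => hS h.1))),
            if_neg (pv_nneg (pv_bfalse d3 (fun h => hH h.1))),
            if_neg (pv_nneg (pv_bfalse d4 (fun h => hH h.1))),
            if_neg (pv_nneg (pv_bfalse (hsw "x.com/") hx)),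
            if_pos (pv_btrue (hsw "twitter.com/") ht),
            if_neg (pv_nneg f1), if_neg (pv_nneg f2),
            if_neg (pv_nneg (pv_bfalse (g0 "x.com/") hx)),
            if_pos (pv_btrue (g0 "twitter.com/") ht)]
          norm_num
        · rw [if_neg (pv_nneg (pv_bfalse d1 (fun h => hS h.1))),
            if_neg (pv_nneg (pv_bfalse d2 (fun h => hS h.1))),
            if_neg (pv_nneg (pv_bfalse d3 (fun h => hH h.1))),
            if_neg (pv_nneg (pv_bfalse d4 (fun h => hH h.1))),
            if_neg (pv_nneg (pv_bfalse (hsw "x.com/") hx)),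
            if_neg (pv_nneg (pv_bfalse (hsw "twitter.com/") ht)),
            if_neg (pv_nneg f1), if_neg (pv_nneg f2),
            if_neg (pv_nneg (pv_bfalse (g0 "x.com/") hx)),
            if_neg (pv_nneg (pv_bfalse (g0 "twitter.com/") ht))]

-- ===== VERDICT (by name: the statement is the Claim_ definition above) =====
theorem normalize_account_py_spec : Claim_equal_normalize_account_py := by
  intro account _
  unfold Spec_normalize_account_py normalize_account_py normalize_account_py_alt
  dsimp only
  rw [pv_stage_eq (PySem.Str.strip account)]
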